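-- pv_equiv track=rewrite | github.com/meowpunch/meowrithm | python/tesla/1.py | solution
-- ===== SOURCE A (Python) =====
-- def solution(S: str):
--     numOfPatch = 0
--
--     i = 0
--     while i < len(S):
--         if S[i] == 'X':
--             numOfPatch += 1
--             i += 3
--         else:
--             i += 1
--
--     return numOfPatch
-- ===== SOURCE B (Python) =====
-- def solution(S: str):
--     count = 0
--     rest = S
--     while True:
--         idx = rest.find('X')
--         if idx < 0:
--             return count
--         count += 1
--         rest = rest[idx + 3:]
-- ===== Notes on version B (the rewrite author's own statement) =====
-- stated objective: alternative
-- what changed: Replaces A's per-index greedy while-loop (jump i by 3 after each patch) with a search-and-slice loop: repeatedly str.find the next 'X', count a patch, and slice the string past the patch's 3-char reach; no individual index is inspected by the Python code.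
import Mathlib
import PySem

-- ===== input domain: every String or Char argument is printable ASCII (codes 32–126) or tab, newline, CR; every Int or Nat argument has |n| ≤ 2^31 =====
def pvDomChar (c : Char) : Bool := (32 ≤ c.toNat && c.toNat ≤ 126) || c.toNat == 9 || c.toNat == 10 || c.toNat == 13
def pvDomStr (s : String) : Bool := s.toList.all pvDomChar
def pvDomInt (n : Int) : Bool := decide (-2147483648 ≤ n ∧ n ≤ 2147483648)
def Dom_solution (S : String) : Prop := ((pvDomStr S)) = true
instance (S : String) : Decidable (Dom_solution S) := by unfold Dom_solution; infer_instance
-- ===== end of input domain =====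

-- B replaces A's per-index greedy loop with a find-next-'X'-and-slice loop (alternative decomposition; return-value equivalence).


-- ===== PORT A =====
-- A's while loop: i starts at 0; on 'X' count a patch and jump i by 3, else step by 1.
def solutionGo (cs : List Char) (i : Nat) : Int :=
  if _h : i < cs.length then
    if cs.getD i ' ' = 'X' then 1 + solutionGo cs (i + 3)
    else solutionGo cs (i + 1)
  else 0
termination_by cs.length - i
decreasing_by all_goals omega

def solution (S : String) : Int := solutionGo S.toList 0

-- ===== PORT B =====
-- findX = rest.find('X'): index of first 'X', none if absent (exact port of str.find;
-- Python's -1 is rendered as none and tested by the caller's idx < 0 branch).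
def findX : List Char → Option Nat
  | [] => none
  | c :: rest => if c = 'X' then some 0 else (findX rest).map (· + 1)

-- B's loop: find next 'X'; if none return count, else count += 1 and rest = rest[idx+3:]
-- (the slice has a nonnegative start, so List.drop is exact there).
def solutionAltGo (cs : List Char) (count : Int) : Int :=
  match h : findX cs with
  | none => count
  | some idx => solutionAltGo (cs.drop (idx + 3)) (count + 1)
termination_by cs.length
decreasing_by
  have hne : cs ≠ [] := by intro e; subst e; simp [findX] at h
  have : 0 < cs.length := List.length_pos_iff.mpr hne
  simp [List.length_drop]; omega

def solution_alt (S : String) : Int := solutionAltGo S.toList 0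

-- ===== PRECONDITION & SPEC =====
def Spec_solution (S : String) (out : Int) : Prop := out = solution_alt S
instance (S : String) (out : Int) : Decidable (Spec_solution S out) := by unfold Spec_solution; infer_instance

-- ===== CLAIM (what is proved, stated in full; the proofs are below) =====
def Claim_equal_solution : Prop := ∀ (S : String), Dom_solution S → Spec_solution S (solution S)

-- ===== LEMMAS AND PROOFS =====
theorem altGo_none (cs : List Char) (count : Int) (h : findX cs = none) :
    solutionAltGo cs count = count := by
  rw [solutionAltGo]; split <;> simp_all

theorem altGo_some (cs : List Char) (count : Int) (idx : Nat) (h : findX cs = some idx) :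
    solutionAltGo cs count = solutionAltGo (cs.drop (idx + 3)) (count + 1) := by
  rw [solutionAltGo]; split <;> simp_all

theorem altGo_cons_ne (c : Char) (rest : List Char) (count : Int) (hc : c ≠ 'X') :
    solutionAltGo (c :: rest) count = solutionAltGo rest count := by
  cases hr : findX rest with
  | none =>
    rw [altGo_none _ _ hr, altGo_none _ _ (by simp [findX, hc, hr])]
  | some idx =>
    rw [altGo_some _ _ idx hr,
        altGo_some (c :: rest) count (idx + 1) (by simp [findX, hc, hr])]
    have : (c :: rest).drop (idx + 1 + 3) = rest.drop (idx + 3) := by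
      simp [List.drop_succ_cons]
    rw [this]

theorem main_inv (n : Nat) : ∀ (cs : List Char) (i : Nat) (count : Int),
    cs.length - i ≤ n → solutionAltGo (cs.drop i) count = count + solutionGo cs i := by
  induction n with
  | zero =>
    intro cs i count h
    rw [List.drop_of_length_le (by omega), altGo_none _ _ (by simp [findX])]
    rw [solutionGo, dif_neg (by omega)]
    ring
  | succ n ih =>
    intro cs i count h
    by_cases hi : i < cs.length
    · have hdrop : cs.drop i = cs[i] :: cs.drop (i + 1) := List.drop_eq_getElem_cons hi
      by_cases hx : cs.getD i ' ' = 'X'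
      · have hx' : cs[i] = 'X' := by rwa [List.getD_eq_getElem cs ' ' hi] at hx
        rw [hdrop, altGo_some _ _ 0 (by simp [findX, hx'])]
        have : (cs[i] :: cs.drop (i + 1)).drop (0 + 3) = cs.drop (i + 3) := by
          simp [List.drop_drop]
        rw [this, ih cs (i + 3) (count + 1) (by omega)]
        conv_rhs => rw [solutionGo]
        rw [dif_pos hi, if_pos hx]
        ring
      · have hx' : cs[i] ≠ 'X' := by rwa [List.getD_eq_getElem cs ' ' hi] at hx
        rw [hdrop, altGo_cons_ne _ _ _ hx', ih cs (i + 1) count (by omega)]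
        conv_rhs => rw [solutionGo]
        rw [dif_pos hi, if_neg hx]
    · rw [List.drop_of_length_le (by omega), altGo_none _ _ (by simp [findX])]
      rw [solutionGo, dif_neg (by omega)]
      ring

-- ===== VERDICT (by name: the statement is the Claim_ definition above) =====
theorem solution_spec : Claim_equal_solution := by
  intro S _
  unfold Spec_solution solution solution_alt
  have := main_inv S.toList.length S.toList 0 0 (by omega)
  simpa using this.symm
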